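-- pv_equiv track=rewrite | github.com/nrafidi/thesis-code | python/load_data.py | get_arts_from_senid
-- ===== SOURCE A (Python) =====
-- ARTICLE1 = {'a': [4, 6, 9, 10, 13, 15, 16, 19, 21, 22, 24, 26, 28, 31, 33, 35],
--             'the': [5, 7, 8, 11, 12, 14, 17, 18, 20, 23, 25, 27, 29, 30, 32, 34]}
--
-- ARTICLE2 = {'a': [5, 6, 8, 10, 12, 15, 17, 19, 20, 22, 25, 26, 29, 31, 32, 35],
--             'the': [4, 7, 9, 11, 13, 14, 16, 18, 21, 23, 24, 27, 28, 30, 33, 34]}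
--
-- def get_arts_from_senid(sentence_ids, art_num):
--     arts = []
--     for sen in sentence_ids:
--         if art_num == 1:
--             for key in ARTICLE1:
--                 if sen in ARTICLE1[key]:
--                     arts.append(key)
--         elif art_num ==2:
--             for key in ARTICLE2:
--                 if sen in ARTICLE2[key]:
--                     arts.append(key)
--         else:
--             raise NameError('There are only two articles, dingus')
--     if len(arts) != len(sentence_ids):
--         raise AssertionError('Should be same length:\narts={}\nsentence_ids={}'.format(arts, sentence_ids))
--     return arts
-- ===== SOURCE B (Python) =====
-- ARTICLE1 = {'a': [4, 6, 9, 10, 13, 15, 16, 19, 21, 22, 24, 26, 28, 31, 33, 35],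
--             'the': [5, 7, 8, 11, 12, 14, 17, 18, 20, 23, 25, 27, 29, 30, 32, 34]}
--
-- ARTICLE2 = {'a': [5, 6, 8, 10, 12, 15, 17, 19, 20, 22, 25, 26, 29, 31, 32, 35],
--             'the': [4, 7, 9, 11, 13, 14, 16, 18, 21, 23, 24, 27, 28, 30, 33, 34]}
--
-- # Each article's 'a'/'the' lists partition 4..35, so one bitmask of the 'a'-ids
-- # decides the key arithmetically: bit set -> 'a', clear (within 4..35) -> 'the'.
-- A_MASK1 = sum(1 << s for s in ARTICLE1['a'])  # 45456402000
-- A_MASK2 = sum(1 << s for s in ARTICLE2['a'])  # 41445660000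
--
-- def get_arts_from_senid(sentence_ids, art_num):
--     arts = []
--     for sen in sentence_ids:
--         if art_num == 1:
--             mask = A_MASK1
--         elif art_num == 2:
--             mask = A_MASK2
--         else:
--             raise NameError('There are only two articles, dingus')
--         if 4 <= sen <= 35:
--             arts.append('a' if (mask >> sen) & 1 else 'the')
--     if len(arts) != len(sentence_ids):
--         raise AssertionError('Should be same length:\narts={}\nsentence_ids={}'.format(arts, sentence_ids))
--     return arts
-- ===== Notes on version B (the rewrite author's own statement) =====
-- stated objective: alternative
-- what changed: Replaces the per-sentence scan over both article key-lists with a bit test: since each article's 'a'/'the' lists partition 4..35, a single precomputed bitmask of the 'a'-ids decides the key arithmetically, with no dict traversal at all.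
import Mathlib
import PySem

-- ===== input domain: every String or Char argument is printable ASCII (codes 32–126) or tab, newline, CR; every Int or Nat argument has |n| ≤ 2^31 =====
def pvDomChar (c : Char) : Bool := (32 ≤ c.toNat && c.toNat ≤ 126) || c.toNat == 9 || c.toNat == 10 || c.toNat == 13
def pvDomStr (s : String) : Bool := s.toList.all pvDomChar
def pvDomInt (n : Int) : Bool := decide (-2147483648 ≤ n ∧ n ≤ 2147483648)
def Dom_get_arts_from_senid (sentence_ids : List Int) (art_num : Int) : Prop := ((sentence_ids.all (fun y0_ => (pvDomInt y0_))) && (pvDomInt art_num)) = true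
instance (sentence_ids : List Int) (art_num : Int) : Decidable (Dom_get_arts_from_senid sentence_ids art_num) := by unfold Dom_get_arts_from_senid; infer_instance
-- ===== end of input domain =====

-- B replaces A's per-sentence scan over both article key-lists by a bit test on a
-- precomputed bitmask of each article's 'a'-ids (the 'a'/'the' lists partition 4..35),
-- so no dict is traversed at all (objective: alternative). Both programs raise
-- (NameError / AssertionError) on exactly the same inputs; Pre_ excludes those.

-- ===== PORT A =====
def pvArticle1 : PySem.Dict String (List Int) :=
  PySem.Dict.ofList [("a", [4, 6, 9, 10, 13, 15, 16, 19, 21, 22, 24, 26, 28, 31, 33, 35]),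
   ("the", [5, 7, 8, 11, 12, 14, 17, 18, 20, 23, 25, 27, 29, 30, 32, 34])]

def pvArticle2 : PySem.Dict String (List Int) :=
  PySem.Dict.ofList [("a", [5, 6, 8, 10, 12, 15, 17, 19, 20, 22, 25, 26, 29, 31, 32, 35]),
   ("the", [4, 7, 9, 11, 13, 14, 16, 18, 21, 23, 24, 27, 28, 30, 33, 34])]

-- raise branches (NameError / final AssertionError) are excluded by Pre_; the port
-- returns the accumulated list there.
def get_arts_from_senid (sentence_ids : List Int) (art_num : Int) : List String :=
  sentence_ids.foldl (fun arts sen =>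
    if art_num = 1 then
      (PySem.Dict.keys pvArticle1).foldl (fun arts key =>
        if sen ∈ PySem.Dict.getD pvArticle1 key [] then arts ++ [key] else arts) arts
    else if art_num = 2 then
      (PySem.Dict.keys pvArticle2).foldl (fun arts key =>
        if sen ∈ PySem.Dict.getD pvArticle2 key [] then arts ++ [key] else arts) arts
    else arts) []

-- ===== PORT B =====
-- A_MASK = sum(1 << s for s in ARTICLE['a'])
def pvAMask1 : Nat := 45456402000
def pvAMask2 : Nat := 41445660000

-- (mask >> sen) & 1 — sen is nonnegative under the 4 <= sen guard, so toNat is exact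
def get_arts_from_senid_alt (sentence_ids : List Int) (art_num : Int) : List String :=
  sentence_ids.foldl (fun arts sen =>
    if art_num = 1 ∨ art_num = 2 then
      let mask := if art_num = 1 then pvAMask1 else pvAMask2
      if 4 ≤ sen ∧ sen ≤ 35 then
        arts ++ [if (mask >>> sen.toNat) &&& 1 = 1 then "a" else "the"]
      else arts
    else arts) []   -- raise NameError: excluded by Pre_

-- ===== PRECONDITION & SPEC =====
-- Pre_ excludes exactly the inputs where the Python raises: a nonempty list with
-- art_num outside {1,2} (NameError), and any sentence id outside 4..35 (final
-- AssertionError, since 4..35 is exactly the set of covered ids).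
def Pre_get_arts_from_senid (sentence_ids : List Int) (art_num : Int) : Prop :=
  sentence_ids = [] ∨
    ((art_num = 1 ∨ art_num = 2) ∧ ∀ s ∈ sentence_ids, 4 ≤ s ∧ s ≤ 35)
instance (sentence_ids : List Int) (art_num : Int) : Decidable (Pre_get_arts_from_senid sentence_ids art_num) := by unfold Pre_get_arts_from_senid; infer_instance

def pvWitness_get_arts_from_senid : List Int × Int := ([4, 5, 35], 1)

def Spec_get_arts_from_senid (sentence_ids : List Int) (art_num : Int) (out : List String) : Prop := out = get_arts_from_senid_alt sentence_ids art_num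
instance (sentence_ids : List Int) (art_num : Int) (out : List String) : Decidable (Spec_get_arts_from_senid sentence_ids art_num out) := by unfold Spec_get_arts_from_senid; infer_instance

-- ===== CLAIM =====
def Claim_equal_get_arts_from_senid : Prop := ∀ (sentence_ids : List Int) (art_num : Int), Dom_get_arts_from_senid sentence_ids art_num → Pre_get_arts_from_senid sentence_ids art_num → Spec_get_arts_from_senid sentence_ids art_num (get_arts_from_senid sentence_ids art_num)

-- ===== LEMMAS AND PROOFS =====

def pvStepA (art_num : Int) (arts : List String) (sen : Int) : List String :=
  if art_num = 1 then
    (PySem.Dict.keys pvArticle1).foldl (fun arts key =>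
      if sen ∈ PySem.Dict.getD pvArticle1 key [] then arts ++ [key] else arts) arts
  else if art_num = 2 then
    (PySem.Dict.keys pvArticle2).foldl (fun arts key =>
      if sen ∈ PySem.Dict.getD pvArticle2 key [] then arts ++ [key] else arts) arts
  else arts

def pvStepB (art_num : Int) (arts : List String) (sen : Int) : List String :=
  if art_num = 1 ∨ art_num = 2 then
    let mask := if art_num = 1 then pvAMask1 else pvAMask2
    if 4 ≤ sen ∧ sen ≤ 35 then
      arts ++ [if (mask >>> sen.toNat) &&& 1 = 1 then "a" else "the"]
    else arts
  else arts

lemma pvStep_agree (art_num sen : Int) (h1 : art_num = 1 ∨ art_num = 2)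
    (h2 : 4 ≤ sen ∧ sen ≤ 35) (arts : List String) :
    pvStepA art_num arts sen = pvStepB art_num arts sen := by
  obtain ⟨hlo, hhi⟩ := h2
  rcases h1 with h | h <;> subst h <;>
    interval_cases sen <;> rfl

lemma pvFold_agree (sentence_ids : List Int) (art_num : Int)
    (h1 : art_num = 1 ∨ art_num = 2)
    (h2 : ∀ s ∈ sentence_ids, 4 ≤ s ∧ s ≤ 35) (arts : List String) :
    sentence_ids.foldl (pvStepA art_num) arts = sentence_ids.foldl (pvStepB art_num) arts := by
  induction sentence_ids generalizing arts with
  | nil => rfl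
  | cons s rest ih =>
    simp only [List.foldl_cons]
    rw [pvStep_agree art_num s h1 (h2 s (List.mem_cons_self)) arts]
    exact ih (fun x hx => h2 x (List.mem_cons_of_mem _ hx)) _

-- ===== VERDICT =====
theorem get_arts_from_senid_spec : Claim_equal_get_arts_from_senid := by
  intro sentence_ids art_num _ hpre
  unfold Spec_get_arts_from_senid get_arts_from_senid get_arts_from_senid_alt
  rcases hpre with h | ⟨h1, h2⟩
  · subst h; rfl
  · exact pvFold_agree sentence_ids art_num h1 h2 []
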